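-- pv_equiv track=rewrite | github.com/ripthetoilet/crypto-FB-9 | cp2/druz_fb-92_cp2/lab2.py | CT_segmentation
-- ===== SOURCE A (Python) =====
-- def CT_segmentation(text, r):
--     mass = []
--     i = 0
--     while(i<r):
--         mass.append('')
--         i += 1
--     i = 0
--     while(i<r):
--         j = i
--         while(j<len(text)):
--             mass[i] = mass[i] + text[j]
--             j = j + r
--         i += 1
--     return mass
-- ===== SOURCE B (Python) =====
-- def CT_segmentation(text, r):
--     mass = [''] * r
--     if r > 0:
--         for idx, ch in enumerate(text):
--             mass[idx % r] += ch
--     return mass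
-- ===== Notes on version B (the rewrite author's own statement) =====
-- stated objective: faster
-- what changed: Replaces the r strided scans (outer loop over segments, inner loop jumping by r through the text) by a single forward pass over the text that appends each character to bucket idx % r, with [''] * r giving the empty result for r <= 0 just as A's loops do.
import Mathlib
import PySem

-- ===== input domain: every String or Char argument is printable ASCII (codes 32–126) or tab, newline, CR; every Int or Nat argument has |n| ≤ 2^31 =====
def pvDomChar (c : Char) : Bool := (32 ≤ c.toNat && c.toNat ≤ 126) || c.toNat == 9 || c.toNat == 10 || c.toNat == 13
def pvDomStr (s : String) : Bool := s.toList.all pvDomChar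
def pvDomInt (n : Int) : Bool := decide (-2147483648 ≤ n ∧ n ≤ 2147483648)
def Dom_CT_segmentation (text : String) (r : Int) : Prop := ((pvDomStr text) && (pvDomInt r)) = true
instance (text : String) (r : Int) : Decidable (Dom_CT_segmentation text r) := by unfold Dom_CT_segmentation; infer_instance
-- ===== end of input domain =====

-- B replaces A's r strided scans through the text by one forward pass appending each char to bucket idx % r.

-- ===== PORT A =====
-- first while loop: append '' to mass while i < r
def pvBuildA (r i : Int) (mass : List String) : List String :=
  if _h : i < r then pvBuildA r (i + 1) (mass ++ [""]) else mass
termination_by (r - i).toNat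
decreasing_by omega

-- inner while loop: j strides by r; s is the current value of mass[i]
-- (the '0 < r' test and the 'none' match arm are totality guards only: every call has
--  0 < r and 0 ≤ j < len, where Python's loop terminates and text[j] is in range)
def pvInnerA (cs : List Char) (r j : Int) (s : String) : String :=
  if _h0 : 0 < r then
    if _h1 : j < (cs.length : Int) then
      match PySem.List.pyGet? cs j with
      | some c => pvInnerA cs r (j + r) (s.push c)   -- mass[i] = mass[i] + text[j]
      | none => s
    else s
  else s
termination_by ((cs.length : Int) - j).toNat
decreasing_by omega

-- outer while loop over i
def pvOuterA (cs : List Char) (r i : Int) (mass : List String) : List String :=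
  if _h : i < r then
    pvOuterA cs r (i + 1)
      (PySem.List.pySetD mass i (pvInnerA cs r i (PySem.List.pyGetD mass i "")))
  else mass
termination_by (r - i).toNat
decreasing_by omega

def CT_segmentation (text : String) (r : Int) : List String :=
  pvOuterA text.toList r 0 (pvBuildA r 0 [])

-- ===== PORT B =====
-- one step of the for loop: mass[idx % r] += ch
def pvStepB (r : Int) (m : List String) (p : Int × Char) : List String :=
  PySem.List.pySetD m (PySem.Int.mod p.1 r) ((PySem.List.pyGetD m (PySem.Int.mod p.1 r) "").push p.2)

def CT_segmentation_alt (text : String) (r : Int) : List String :=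
  -- mass = [''] * r  (empty for r ≤ 0), then the guarded enumerate loop
  if 0 < r then (PySem.List.enumerate text.toList 0).foldl (pvStepB r) (List.replicate r.toNat "")
  else List.replicate r.toNat ""

-- ===== PRECONDITION & SPEC =====
def Spec_CT_segmentation (text : String) (r : Int) (out : List String) : Prop := out = CT_segmentation_alt text r
instance (text : String) (r : Int) (out : List String) : Decidable (Spec_CT_segmentation text r out) := by unfold Spec_CT_segmentation; infer_instance

-- ===== CLAIM (what is proved, stated in full; the proofs are below) =====
def Claim_equal_CT_segmentation : Prop := ∀ (text : String) (r : Int), Dom_CT_segmentation text r → Spec_CT_segmentation text r (CT_segmentation text r)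

-- ===== LEMMAS AND PROOFS =====

-- the chars of cs at indices j, j + (d+1), j + 2(d+1), …  (A's inner stride, step d+1)
def pvPick (cs : List Char) (d j : Nat) : List Char :=
  if h : j < cs.length then cs[j] :: pvPick cs d (j + d + 1) else []
termination_by cs.length - j

-- the chars of cs whose (index + t) is ≡ k mod R  (B's bucket k, indices counted from t)
def pvG (R t : Nat) (cs : List Char) (k : Nat) : List Char :=
  match cs with
  | [] => []
  | c :: cs => (if t % R = k then [c] else []) ++ pvG R (t + 1) cs k

lemma pvPushAppend (s : String) (c : Char) (l : List Char) :
    (s.push c) ++ String.ofList l = s ++ String.ofList (c :: l) :=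
  String.toList_inj.mp (by simp)

lemma pvAppendNil (s : String) : s ++ String.ofList [] = s :=
  String.toList_inj.mp (by simp)

lemma pvEmptyAppend (l : List Char) : ("" : String) ++ String.ofList l = String.ofList l :=
  String.toList_inj.mp (by simp)

lemma pvModCast (t : Nat) (r : Int) (hr : 0 < r) :
    PySem.Int.mod (t : Int) r = ((t % r.toNat : Nat) : Int) := by
  have h0 : ((r.toNat : Int)) = r := Int.toNat_of_nonneg (le_of_lt hr)
  have h1 : PySem.Int.mod (t : Int) r = (t : Int) % r := by
    simp only [PySem.Int.mod]
    rw [Int.fmod_eq_emod, if_pos (Or.inl (le_of_lt hr))]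
    ring
  rw [h1, ← h0]
  push_cast
  rfl

lemma pvBuildA_eq (r i : Int) (mass : List String) :
    pvBuildA r i mass = mass ++ List.replicate (r - i).toNat "" := by
  fun_induction pvBuildA r i mass with
  | case1 i mass h ih =>
      rw [ih, List.append_assoc]
      congr 1
      have hn : (r - i).toNat = (r - (i + 1)).toNat + 1 := by omega
      rw [hn, List.replicate_succ]
      rfl
  | case2 i mass h =>
      have hn : (r - i).toNat = 0 := by omega
      simp [hn]

lemma pvPick_cons_succ (c : Char) (cs : List Char) (d : Nat) :
    ∀ j, pvPick (c :: cs) d (j + 1) = pvPick cs d j := by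
  intro j
  fun_induction pvPick cs d j with
  | case1 j h ih =>
      conv_lhs => rw [pvPick]
      rw [dif_pos (show j + 1 < (c :: cs).length by simpa using Nat.succ_lt_succ h)]
      simp only [List.getElem_cons_succ]
      rw [show j + 1 + d + 1 = j + d + 1 + 1 from by omega, ih]
  | case2 j h =>
      conv_lhs => rw [pvPick]
      rw [dif_neg (by simpa using h)]

lemma pvInnerA_eq (cs : List Char) (r : Int) (hr : 0 < r) :
    ∀ (j : Int) (s : String), 0 ≤ j →
      pvInnerA cs r j s = s ++ String.ofList (pvPick cs (r.toNat - 1) j.toNat) := by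
  intro j s
  fun_induction pvInnerA cs r j s with
  | case1 j s h0 h1 c heq ih =>
      intro hj
      have hlt : j.toNat < cs.length := by omega
      rw [PySem.List.pyGet?_eq_some_getElem cs hj h1] at heq
      have hc : c = cs[j.toNat] := (Option.some_inj.mp heq).symm
      rw [ih (by omega), hc, pvPushAppend]
      conv_rhs => rw [pvPick]
      rw [dif_pos hlt, show j.toNat + (r.toNat - 1) + 1 = (j + r).toNat from by omega]
  | case2 j s h0 h1 heq =>
      intro hj
      rw [PySem.List.pyGet?_eq_some_getElem cs hj h1] at heq
      simp at heq
  | case3 j s h0 h1 =>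
      intro hj
      conv_rhs => rw [pvPick]
      rw [dif_neg (by omega), pvAppendNil]
  | case4 j s h0 =>
      exact absurd hr h0

lemma pvModNe (R t j : Nat) (hR : 0 < R) (hj : 0 < j) (hjR : j < R) :
    t % R ≠ (t + j) % R := by
  intro h
  have ha : t % R < R := Nat.mod_lt _ hR
  rw [Nat.add_mod, Nat.mod_eq_of_lt hjR] at h
  by_cases hc : t % R + j < R
  · rw [Nat.mod_eq_of_lt hc] at h; omega
  · have h2 : (t % R + j) % R = t % R + j - R := by
      rw [Nat.mod_eq_sub_mod (by omega), Nat.mod_eq_of_lt (by omega)]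
    rw [h2] at h; omega

lemma pvPick_eq_pvG (d : Nat) :
    ∀ (cs : List Char) (t j : Nat), j ≤ d →
      pvPick cs d j = pvG (d + 1) t cs ((t + j) % (d + 1)) := by
  intro cs
  induction cs with
  | nil =>
      intro t j hj
      rw [pvPick, dif_neg (by simp)]
      rfl
  | cons c cs ih =>
      intro t j hj
      match j with
      | 0 =>
          simp only [Nat.add_zero]
          simp only [pvG, if_true]
          simp only [List.singleton_append]
          rw [pvPick, dif_pos (by simp)]
          simp only [List.getElem_cons_zero, Nat.zero_add]
          rw [pvPick_cons_succ]
          rw [ih (t + 1) d (le_refl d)]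
          congr 1
          rw [show t + 1 + d = t + (d + 1) from by omega, Nat.add_mod_right]
      | j' + 1 =>
          rw [pvPick_cons_succ, ih (t + 1) j' (by omega)]
          simp only [pvG]
          rw [if_neg (pvModNe (d + 1) t (j' + 1) (by omega) (by omega) (by omega))]
          simp only [List.nil_append]
          congr 2
          omega

lemma pvGetD_set (m : List String) (K k : Nat) (v : String) (hk : k < m.length) :
    (m.set K v).getD k "" = if K = k then v else m.getD k "" := by
  rw [List.getD_eq_getElem _ _ (by simpa using hk), List.getD_eq_getElem _ _ hk]
  rw [List.getElem_set]

lemma pvFoldB (r : Int) (hr : 0 < r) :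
    ∀ (cs : List Char) (t : Nat) (m : List String), m.length = r.toNat →
      (PySem.List.enumerate cs (t : Int)).foldl (pvStepB r) m
        = (List.range r.toNat).map (fun k => m.getD k "" ++ String.ofList (pvG r.toNat t cs k)) := by
  intro cs
  induction cs with
  | nil =>
      intro t m hm
      rw [PySem.List.enumerate_nil, List.foldl_nil]
      apply List.ext_getElem (by simp [hm])
      intro k h1 h2
      simp only [List.getElem_map, List.getElem_range]
      rw [pvG, pvAppendNil, List.getD_eq_getElem]
  | cons c cs ih =>
      intro t m hm
      rw [PySem.List.enumerate_cons, List.foldl_cons]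
      have hstep : pvStepB r m ((t : Int), c)
          = m.set (t % r.toNat) ((m.getD (t % r.toNat) "").push c) := by
        simp only [pvStepB, pvModCast t r hr]
        rw [PySem.List.pySetD_natCast, PySem.List.pyGetD_natCast]
      rw [hstep]
      rw [show ((t : Int) + 1) = ((t + 1 : Nat) : Int) from by push_cast; ring]
      rw [ih (t + 1) _ (by simpa using hm)]
      apply List.map_congr_left
      intro k hk
      have hklt : k < r.toNat := List.mem_range.mp hk
      rw [pvGetD_set m (t % r.toNat) k _ (by omega)]
      show _ = m.getD k "" ++ String.ofList ((if t % r.toNat = k then [c] else []) ++ pvG r.toNat (t + 1) cs k)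
      by_cases hEq : t % r.toNat = k
      · rw [if_pos hEq, if_pos hEq, hEq]
        simp only [List.singleton_append]
        rw [pvPushAppend]
      · rw [if_neg hEq, if_neg hEq]
        simp only [List.nil_append]

lemma pvOuterA_eq (cs : List Char) (r : Int) (hr : 0 < r) :
    ∀ (m : Nat) (pre : List String), m ≤ r.toNat → pre.length = r.toNat - m →
      pvOuterA cs r ((r.toNat - m : Nat) : Int) (pre ++ List.replicate m "")
        = pre ++ (List.range' (r.toNat - m) m).map (fun k : Nat => pvInnerA cs r (k : Int) "") := by
  have hcast : ((r.toNat : Int)) = r := Int.toNat_of_nonneg (le_of_lt hr)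
  intro m
  induction m with
  | zero =>
      intro pre _ _
      rw [pvOuterA, dif_neg (by omega)]
      simp
  | succ m ih =>
      intro pre hm hpre
      rw [pvOuterA, dif_pos (by omega)]
      rw [show ((r.toNat - (m + 1) : Nat) : Int) = ((pre.length : Nat) : Int) from by rw [hpre]]
      rw [PySem.List.pyGetD_natCast, PySem.List.pySetD_natCast]
      have hget : (pre ++ List.replicate (m + 1) "").getD pre.length "" = "" := by
        rw [List.getD_eq_getElem _ _ (by simp)]
        rw [List.getElem_append_right (le_refl _)]
        simp
      rw [hget]
      set v := pvInnerA cs r (pre.length : Int) "" with hv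
      have hset : (pre ++ List.replicate (m + 1) "").set pre.length v
          = (pre ++ [v]) ++ List.replicate m "" := by
        rw [List.set_append_right _ _ (le_refl _)]
        simp [List.replicate_succ]
      rw [hset]
      rw [show (pre.length : Int) + 1 = ((r.toNat - m : Nat) : Int) from by rw [hpre]; omega]
      rw [ih (pre ++ [v]) (by omega) (by simp; omega)]
      conv_rhs => rw [List.range'_succ]
      rw [show r.toNat - (m + 1) + 1 = r.toNat - m from by omega]
      rw [List.map_cons]
      rw [List.append_assoc, List.singleton_append]
      congr 2
      rw [hv, hpre]

-- ===== VERDICT (by name: the statement is the Claim_ definition above) =====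
theorem CT_segmentation_spec : Claim_equal_CT_segmentation := by
  unfold Claim_equal_CT_segmentation
  intro text r _
  unfold Spec_CT_segmentation CT_segmentation CT_segmentation_alt
  by_cases hr : 0 < r
  · rw [if_pos hr]
    rw [pvBuildA_eq]
    simp only [Int.sub_zero, List.nil_append]
    have houter := pvOuterA_eq text.toList r hr r.toNat [] (le_refl _) (by simp)
    simp only [Nat.sub_self, Nat.cast_zero, List.nil_append] at houter
    rw [houter, ← List.range_eq_range']
    have hfold := pvFoldB r hr text.toList 0 (List.replicate r.toNat "") (by simp)
    simp only [Nat.cast_zero] at hfold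
    rw [hfold]
    apply List.map_congr_left
    intro k hk
    have hklt : k < r.toNat := List.mem_range.mp hk
    rw [pvInnerA_eq text.toList r hr (k : Int) "" (by omega)]
    rw [Int.toNat_natCast]
    rw [List.getD_replicate _ hklt]
    rw [pvEmptyAppend, pvEmptyAppend]
    rw [pvPick_eq_pvG (r.toNat - 1) text.toList 0 k (by omega)]
    rw [show r.toNat - 1 + 1 = r.toNat from by omega]
    rw [Nat.zero_add, Nat.mod_eq_of_lt hklt]
  · rw [if_neg hr]
    rw [pvBuildA_eq]
    rw [show (r - 0).toNat = 0 from by omega, show r.toNat = 0 from by omega]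
    simp only [List.replicate_zero, List.append_nil]
    rw [pvOuterA, dif_neg (by omega)]
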